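-- pv_equiv track=rewrite | github.com/victorialangoe/IN4110 | assignment4/fetch_olympic_statistics.py | find_best_country_in_sport
-- ===== SOURCE A (Python) =====
-- def find_best_country_in_sport(
--     results: dict[str, dict[str, int]], medal: str = "Gold"
-- ) -> str:
--     """Given a dictionary with medal stats in a given sport for the Scandinavian countries, return the country
--         that has received the most of the given `medal`.
--
--     Parameters:
--         - results (dict) : a dictionary of country specific medal results in a given sport. The format is:
--                         {"Norway" : {"Gold" : 1, "Silver" : 2, "Bronze" : 3},
--                          "Sweden" : {"Gold" : 1, ....},
--                          "Denmark" : ...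
--                         }
--         - medal (str) : medal type to compare for. Valid parameters: ["Gold" | "Silver" |"Bronze"]. Should be used as a key
--                           to the medal dictionary.
--     Returns:
--         - best (str) : name of the country(ies) leading in number of gold medals in the given sport
--                        If one country leads only, return its name, like for instance 'Norway'
--                        If two countries lead return their names separated with '/' like 'Norway/Sweden'
--                        If all or none of the countries lead, return string 'None'
--     """
--     valid_medals = {"Gold", "Silver", "Bronze"}
--     if medal not in valid_medals:
--         raise ValueError(
--             f"{medal} is invalid parameter for ranking, must be in {valid_medals}"
--         )
--
--     new_results_dict = {k: v.get(medal, 0) for k, v in results.items()}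
--     max_value = max(new_results_dict.values())
--     keys_with_max_value = [k for k, v in new_results_dict.items() if v == max_value]
--
--     if len(keys_with_max_value) == 1:
--         best = keys_with_max_value[0]
--     elif len(keys_with_max_value) == 2:
--         best = "/".join(sorted(keys_with_max_value))
--     else:
--         best = "None"
--
--     return best
-- ===== SOURCE B (Python) =====
-- def find_best_country_in_sport(
--     results: dict[str, dict[str, int]], medal: str = "Gold"
-- ) -> str:
--     """Single-pass variant: track the running best count and its leaders."""
--     if medal not in ("Gold", "Silver", "Bronze"):
--         raise ValueError(
--             f"{medal} is invalid parameter for ranking, must be in Gold/Silver/Bronze"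
--         )
--
--     best_value = None
--     leaders = []
--     for country, medals in results.items():
--         count = medals.get(medal, 0)
--         if best_value is None or count > best_value:
--             best_value = count
--             leaders = [country]
--         elif count == best_value:
--             leaders.append(country)
--
--     if best_value is None:
--         raise ValueError("max() arg is an empty sequence")
--     if len(leaders) == 1:
--         return leaders[0]
--     if len(leaders) == 2:
--         return "/".join(sorted(leaders))
--     return "None"
-- ===== Notes on version B (the rewrite author's own statement) =====
-- stated objective: alternative
-- what changed: Replaces the three passes (build a count dict, max over its values, filter for the max) by one loop over results.items() maintaining the running best count and the list of leaders; Pre_ excludes only inputs where A raises ValueError (invalid medal, or empty results via max()), where B raises ValueError too.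
import Mathlib
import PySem

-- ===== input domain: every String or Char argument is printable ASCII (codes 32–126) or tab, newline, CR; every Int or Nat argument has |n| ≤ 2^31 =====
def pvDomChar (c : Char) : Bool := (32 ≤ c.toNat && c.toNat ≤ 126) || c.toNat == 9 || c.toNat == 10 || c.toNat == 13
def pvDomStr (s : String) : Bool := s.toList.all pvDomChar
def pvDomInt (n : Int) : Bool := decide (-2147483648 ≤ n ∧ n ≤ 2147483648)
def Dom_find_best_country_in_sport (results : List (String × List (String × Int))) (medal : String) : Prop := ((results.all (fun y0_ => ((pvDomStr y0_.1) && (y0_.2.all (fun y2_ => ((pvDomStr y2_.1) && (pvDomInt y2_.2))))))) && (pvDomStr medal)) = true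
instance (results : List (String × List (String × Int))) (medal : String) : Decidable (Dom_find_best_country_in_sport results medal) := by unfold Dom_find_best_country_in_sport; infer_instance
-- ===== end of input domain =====

-- B replaces A's three passes (count dict, max over values, filter for the max) by one
-- loop over the dict items maintaining the running best count and the leader list.

-- ===== PORT A =====
def find_best_country_in_sport (results : List (String × List (String × Int))) (medal : String) : String :=
  if (PySem.Set.ofList ["Gold", "Silver", "Bronze"]).contains medal then
    -- new_results_dict = {k: v.get(medal, 0) for k, v in results.items()}
    let new_results_dict := (PySem.Dict.ofList results).items.map
      (fun kv => (kv.1, (PySem.Dict.ofList kv.2).getD medal 0))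
    -- max_value = max(new_results_dict.values())  — raises ValueError on empty (excluded by Pre_)
    match PySem.List.max? (new_results_dict.map Prod.snd) (fun v => v) with
    | none => "None"
    | some max_value =>
      let keys_with_max_value := (new_results_dict.filter (fun kv => kv.2 == max_value)).map Prod.fst
      if keys_with_max_value.length == 1 then keys_with_max_value.headD ""
      else if keys_with_max_value.length == 2 then
        PySem.Str.join "/" (PySem.List.sorted keys_with_max_value (fun x => x) false)
      else "None"
  else "None"  -- Python raises ValueError here; excluded by Pre_

-- ===== PORT B =====
-- the body of Source B's for-loop, as a named fold step
def pvStepB (medal : String) (st : Option Int × List String)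
    (kv : String × List (String × Int)) : Option Int × List String :=
  let count := (PySem.Dict.ofList kv.2).getD medal 0
  match st.1 with
  | none => (some count, [kv.1])
  | some best =>
    if best < count then (some count, [kv.1])
    else if count == best then (st.1, st.2 ++ [kv.1])
    else st

def find_best_country_in_sport_alt (results : List (String × List (String × Int))) (medal : String) : String :=
  if medal == "Gold" || medal == "Silver" || medal == "Bronze" then
    let st := (PySem.Dict.ofList results).items.foldl (pvStepB medal) (none, [])
    match st.1 with
    | none => "None"  -- Source B raises ValueError here (empty results); excluded by Pre_
    | some _ =>
      if st.2.length == 1 then st.2.headD ""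
      else if st.2.length == 2 then
        PySem.Str.join "/" (PySem.List.sorted st.2 (fun x => x) false)
      else "None"
  else "None"  -- Source B raises ValueError here; excluded by Pre_

-- ===== PRECONDITION & SPEC =====
-- Pre_ excludes exactly the inputs where Python A raises ValueError: an invalid medal
-- name, or an empty results dict (max() of an empty sequence). B raises there too.
def Pre_find_best_country_in_sport (results : List (String × List (String × Int))) (medal : String) : Prop :=
  (medal = "Gold" ∨ medal = "Silver" ∨ medal = "Bronze") ∧ results ≠ []
instance (results : List (String × List (String × Int))) (medal : String) : Decidable (Pre_find_best_country_in_sport results medal) := by unfold Pre_find_best_country_in_sport; infer_instance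
def pvWitness_find_best_country_in_sport : (List (String × List (String × Int))) × String :=
  ([("Norway", [("Gold", 1)]), ("Sweden", [("Gold", 1)])], "Gold")

def Spec_find_best_country_in_sport (results : List (String × List (String × Int))) (medal : String) (out : String) : Prop := out = find_best_country_in_sport_alt results medal
instance (results : List (String × List (String × Int))) (medal : String) (out : String) : Decidable (Spec_find_best_country_in_sport results medal out) := by unfold Spec_find_best_country_in_sport; infer_instance

-- ===== CLAIM (what is proved, stated in full; the proofs are below) =====
def Claim_equal_find_best_country_in_sport : Prop := ∀ (results : List (String × List (String × Int))) (medal : String), Dom_find_best_country_in_sport results medal → Pre_find_best_country_in_sport results medal → Spec_find_best_country_in_sport results medal (find_best_country_in_sport results medal)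

-- ===== LEMMAS AND PROOFS =====

-- the per-country count both programs compute
def pvCnt (medal : String) (kv : String × List (String × Int)) : Int :=
  (PySem.Dict.ofList kv.2).getD medal 0

-- reduction lemmas for B's loop body
theorem pvStepB_gt (medal : String) (v : Int) (acc : List String)
    (kv : String × List (String × Int)) (h : v < pvCnt medal kv) :
    pvStepB medal (some v, acc) kv = (some (pvCnt medal kv), [kv.1]) := by
  simp only [pvStepB, pvCnt] at *
  rw [if_pos h]

theorem pvStepB_eq (medal : String) (v : Int) (acc : List String)
    (kv : String × List (String × Int)) (h : pvCnt medal kv = v) :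
    pvStepB medal (some v, acc) kv = (some v, acc ++ [kv.1]) := by
  simp only [pvStepB, pvCnt] at *
  rw [if_neg (by omega), if_pos (by simp [h])]

theorem pvStepB_lt (medal : String) (v : Int) (acc : List String)
    (kv : String × List (String × Int)) (h : pvCnt medal kv < v) :
    pvStepB medal (some v, acc) kv = (some v, acc) := by
  simp only [pvStepB, pvCnt] at *
  rw [if_neg (by omega), if_neg (by simp; omega)]

-- the running maximum only grows
theorem pv_le_foldl_max (medal : String) (t : List (String × List (String × Int))) :
    ∀ w : Int, w ≤ t.foldl (fun m kv => max m (pvCnt medal kv)) w := by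
  induction t with
  | nil => intro w; simp
  | cons q u ih => intro w; exact le_trans (le_max_left _ _) (ih (max w (pvCnt medal q)))

-- loop invariant for B's fold, started from a known best `v` with accumulated leaders `acc`
theorem pvStepB_inv (medal : String) (L : List (String × List (String × Int)))
    (v : Int) (acc : List String) :
    L.foldl (pvStepB medal) (some v, acc) =
      (some (L.foldl (fun m kv => max m (pvCnt medal kv)) v),
       (if v = L.foldl (fun m kv => max m (pvCnt medal kv)) v then acc else []) ++
       (L.filter (fun kv => pvCnt medal kv == L.foldl (fun m kv => max m (pvCnt medal kv)) v)).map Prod.fst) := by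
  induction L generalizing v acc with
  | nil => simp
  | cons p t ih =>
    simp only [List.foldl_cons, List.filter_cons]
    rcases lt_trichotomy v (pvCnt medal p) with h1 | h1 | h1
    · rw [pvStepB_gt medal v acc p h1, ih]
      have hmax : max v (pvCnt medal p) = pvCnt medal p := by omega
      simp only [hmax]
      have hvM : v ≠ t.foldl (fun m kv => max m (pvCnt medal kv)) (pvCnt medal p) := by
        have := pv_le_foldl_max medal t (pvCnt medal p); omega
      rw [if_neg hvM]
      by_cases h2 : pvCnt medal p = t.foldl (fun m kv => max m (pvCnt medal kv)) (pvCnt medal p)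
      · have hb : (pvCnt medal p == t.foldl (fun m kv => max m (pvCnt medal kv)) (pvCnt medal p)) = true := by
          simpa using h2
        rw [if_pos h2]
        simp [hb]
      · have hb : (pvCnt medal p == t.foldl (fun m kv => max m (pvCnt medal kv)) (pvCnt medal p)) = false := by
          rw [beq_eq_false_iff_ne]; exact h2
        rw [if_neg h2]
        simp [hb]
    · rw [pvStepB_eq medal v acc p h1.symm, ih]
      have hmax : max v (pvCnt medal p) = v := by omega
      simp only [hmax]
      by_cases h3 : v = t.foldl (fun m kv => max m (pvCnt medal kv)) v
      · have hp : (pvCnt medal p == t.foldl (fun m kv => max m (pvCnt medal kv)) v) = true := by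
          rw [← h1]; simpa using h3
        rw [if_pos h3, if_pos h3]
        simp [hp]
      · have hp : (pvCnt medal p == t.foldl (fun m kv => max m (pvCnt medal kv)) v) = false := by
          rw [beq_eq_false_iff_ne]; omega
        rw [if_neg h3, if_neg h3]
        simp [hp]
    · rw [pvStepB_lt medal v acc p h1, ih]
      have hmax : max v (pvCnt medal p) = v := by omega
      simp only [hmax]
      have hvM := pv_le_foldl_max medal t v
      have hp : (pvCnt medal p == t.foldl (fun m kv => max m (pvCnt medal kv)) v) = false := by
        rw [beq_eq_false_iff_ne]; omega
      simp only [hp, Bool.false_eq_true, if_false]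

theorem pv_items_ne_nil (results : List (String × List (String × Int))) (h : results ≠ []) :
    (PySem.Dict.ofList results).items ≠ [] := by
  have key : ∀ (l : List (String × List (String × Int))) (d : PySem.Dict String (List (String × Int))),
      d.items ≠ [] → (l.foldl (fun d kv => d.insert kv.1 kv.2) d).items ≠ [] := by
    intro l
    induction l with
    | nil => intro d hd; simpa using hd
    | cons q u ih =>
      intro d hd
      apply ih
      rw [PySem.Dict.items_insert]
      by_cases hc : d.contains q.1
      · simp only [hc, if_true]
        simpa using hd
      · simp only [hc, Bool.false_eq_true, if_false]
        simp
  obtain ⟨p, t, rfl⟩ : ∃ p t, results = p :: t := by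
    cases results with
    | nil => exact absurd rfl h
    | cons p t => exact ⟨p, t, rfl⟩
  have : PySem.Dict.ofList (p :: t) = t.foldl (fun d kv => d.insert kv.1 kv.2) (PySem.Dict.empty.insert p.1 p.2) := rfl
  rw [this]
  apply key
  rw [PySem.Dict.items_insert]
  simp [PySem.Dict.contains_empty]

-- ===== VERDICT (by name: the statement is the Claim_ definition above) =====
theorem find_best_country_in_sport_spec : Claim_equal_find_best_country_in_sport := by
  intro results medal _ hpre
  obtain ⟨hm, hne⟩ := hpre
  unfold Spec_find_best_country_in_sport
  obtain ⟨p, t, hL⟩ : ∃ p t, (PySem.Dict.ofList results).items = p :: t := by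
    have h := pv_items_ne_nil results hne
    cases hx : (PySem.Dict.ofList results).items with
    | nil => exact absurd hx h
    | cons p t => exact ⟨p, t, rfl⟩
  have hgA : ((PySem.Set.ofList ["Gold", "Silver", "Bronze"]).contains medal) = true := by
    rcases hm with rfl | rfl | rfl <;> decide
  have hgB : (medal == "Gold" || medal == "Silver" || medal == "Bronze") = true := by
    rcases hm with rfl | rfl | rfl <;> decide
  unfold find_best_country_in_sport find_best_country_in_sport_alt
  rw [hL]
  simp only [hgA, hgB, if_true]
  -- name the count function and the max
  have hmapsnd : ((p :: t).map (fun kv => (kv.1, (PySem.Dict.ofList kv.2).getD medal 0))).map Prod.snd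
      = pvCnt medal p :: t.map (pvCnt medal) := by
    simp [pvCnt, List.map_map, Function.comp]
  rw [hmapsnd, PySem.List.max?_id_cons, List.foldl_map]
  have hfold1 : (p :: t).foldl (pvStepB medal) (none, [])
      = t.foldl (pvStepB medal) (some (pvCnt medal p), [p.1]) := by
    simp [pvStepB, pvCnt]
  rw [hfold1, pvStepB_inv]
  have hkeys : (((p :: t).map (fun kv => (kv.1, (PySem.Dict.ofList kv.2).getD medal 0))).filter
        (fun kv => kv.2 == t.foldl (fun m kv => max m (pvCnt medal kv)) (pvCnt medal p))).map Prod.fst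
      = (if pvCnt medal p = t.foldl (fun m kv => max m (pvCnt medal kv)) (pvCnt medal p) then [p.1] else []) ++
        (t.filter (fun kv => pvCnt medal kv == t.foldl (fun m kv => max m (pvCnt medal kv)) (pvCnt medal p))).map Prod.fst := by
    rw [List.filter_map]
    simp only [List.map_map]
    have hcomp : ((fun kv => kv.2 == t.foldl (fun m kv => max m (pvCnt medal kv)) (pvCnt medal p)) ∘ (fun kv => (kv.1, (PySem.Dict.ofList kv.2).getD medal 0)))
        = (fun kv => pvCnt medal kv == t.foldl (fun m kv => max m (pvCnt medal kv)) (pvCnt medal p)) := rfl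
    have hcomp2 : (Prod.fst ∘ (fun (kv : String × List (String × Int)) => (kv.1, (PySem.Dict.ofList kv.2).getD medal 0)))
        = Prod.fst := rfl
    rw [hcomp, hcomp2, List.filter_cons]
    by_cases hp : pvCnt medal p = t.foldl (fun m kv => max m (pvCnt medal kv)) (pvCnt medal p)
    · have hb : (pvCnt medal p == t.foldl (fun m kv => max m (pvCnt medal kv)) (pvCnt medal p)) = true := by
        simpa using hp
      rw [if_pos hp]
      simp only [hb, if_true]
      simp
    · have hb : (pvCnt medal p == t.foldl (fun m kv => max m (pvCnt medal kv)) (pvCnt medal p)) = false := by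
        rw [beq_eq_false_iff_ne]; exact hp
      rw [if_neg hp]
      simp only [hb, Bool.false_eq_true, if_false]
      simp
  simp only [hkeys]
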